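-- pv_equiv track=rewrite | github.com/364903129/python---CSE20 | pa3/calculator.py | isfloat
-- ===== SOURCE A (Python) =====
-- def isfloat(token):
--     dot = False
--     minus = False
--     for char in token:
--         if char.isdigit():  # allow many digits in a string
--             continue
--         elif char == ".":  # allow only one dot in a string
--             if not dot:
--                 dot = True
--             else:
--                 return False
--         elif char == "-" and token[0] == "-":  # allow one minus in front
--             if not minus:
--                 minus = True
--             else:
--                 return False
--         else:  # do not allow any other characters in a string
--             return False
--     return True
-- ===== SOURCE B (Python) =====
-- def isfloat(token):
--     body = token[1:] if token[:1] == "-" else token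
--     if body.count(".") > 1:
--         return False
--     return all(c.isdigit() or c == "." for c in body)
-- ===== Notes on version B (the rewrite author's own statement) =====
-- stated objective: simpler
-- what changed: Replaces the stateful flag loop (dot/minus booleans with early returns) by a prefix-strip of one leading minus, a dot-count test, and a single all() membership pass.
import Mathlib
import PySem

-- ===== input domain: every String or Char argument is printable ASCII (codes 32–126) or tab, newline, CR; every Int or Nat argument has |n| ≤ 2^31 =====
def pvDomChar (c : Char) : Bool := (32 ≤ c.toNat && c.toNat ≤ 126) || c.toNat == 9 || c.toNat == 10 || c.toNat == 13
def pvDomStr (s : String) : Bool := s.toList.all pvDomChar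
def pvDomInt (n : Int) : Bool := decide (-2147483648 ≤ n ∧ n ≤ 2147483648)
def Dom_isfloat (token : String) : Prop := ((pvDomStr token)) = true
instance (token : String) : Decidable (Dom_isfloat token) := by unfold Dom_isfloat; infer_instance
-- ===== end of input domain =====

-- B replaces A's stateful flag loop by a leading-minus strip, a dot-count test and one all-chars pass (objective: simpler).

-- ===== PORT A =====
-- the for-loop with its dot/minus flags and early returns; `first` is token.toList (token[0] read as pyGet? 0)
def isfloatLoopA (first : List Char) (chars : List Char) (dot minus : Bool) : Bool :=
  match chars with
  | [] => true
  | c :: rest =>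
    if PySem.Chars.isdigit c then isfloatLoopA first rest dot minus
    else if c = '.' then
      (if !dot then isfloatLoopA first rest true minus else false)
    else if c = '-' && (PySem.List.pyGet? first 0 == some '-') then
      (if !minus then isfloatLoopA first rest dot true else false)
    else false

def isfloat (token : String) : Bool := isfloatLoopA token.toList token.toList false false

-- ===== PORT B =====
def isfloat_alt (token : String) : Bool :=
  let cs := token.toList
  let body := if PySem.List.slice cs none (some 1) = ['-'] then PySem.List.slice cs (some 1) none else cs
  if 1 < PySem.Chars.count body ['.'] then false
  else body.all (fun c => PySem.Chars.isdigit c || c == '.')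

-- ===== PRECONDITION & SPEC =====
def Spec_isfloat (token : String) (out : Bool) : Prop := out = isfloat_alt token
instance (token : String) (out : Bool) : Decidable (Spec_isfloat token out) := by unfold Spec_isfloat; infer_instance

-- ===== CLAIM (what is proved, stated in full; the proofs are below) =====
def Claim_equal_isfloat : Prop := ∀ (token : String), Dom_isfloat token → Spec_isfloat token (isfloat token)

-- ===== LEMMAS AND PROOFS =====

-- str.count of the single-character "." is the element count of '.'
theorem countGo_dot (fuel : Nat) : ∀ (cs : List Char) (acc : Nat), cs.length ≤ fuel →
    PySem.Chars.count.go ['.'] fuel cs acc = acc + cs.count '.' := by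
  induction fuel with
  | zero =>
    intro cs acc h
    cases cs with
    | nil => simp [PySem.Chars.count.go]
    | cons c rest => simp at h
  | succ n ih =>
    intro cs acc h
    cases cs with
    | nil => simp [PySem.Chars.count.go]
    | cons c rest =>
      have hlen : rest.length ≤ n := by simpa using h
      unfold PySem.Chars.count.go
      by_cases hc : c = '.'
      · subst hc
        have hp : List.isPrefixOf ['.'] ('.'::rest) = true := by simp [List.isPrefixOf]
        rw [if_pos hp]
        simp only [List.length_cons, List.length_nil, List.drop_succ_cons, List.drop_zero]
        rw [ih rest (acc+1) hlen, List.count_cons]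
        simp
        omega
      · have hp : List.isPrefixOf ['.'] (c::rest) = false := by
          simp [List.isPrefixOf, beq_iff_eq]
          exact fun h => hc h.symm
        rw [if_neg (by simp [hp])]
        rw [ih rest acc hlen, List.count_cons]
        simp [hc]

theorem count_dot (cs : List Char) : PySem.Chars.count cs ['.'] = cs.count '.' := by
  cases cs with
  | nil => rfl
  | cons c rest =>
    show PySem.Chars.count.go ['.'] (rest.length + 1) (c :: rest) 0 = _
    rw [countGo_dot (rest.length + 1) (c :: rest) 0 (by simp)]
    omega

-- the value B's passes compute on a body list, with `slack` dots still allowed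
def bodyOK (l : List Char) (slack : Nat) : Bool :=
  decide (l.count '.' ≤ slack) && l.all (fun c => PySem.Chars.isdigit c || c == '.')

theorem loopA_eq (first : List Char) :
    ∀ (l : List Char) (dot minus : Bool),
      (minus = true ∨ PySem.List.pyGet? first 0 ≠ some '-') →
      isfloatLoopA first l dot minus = bodyOK l (if dot then 0 else 1) := by
  intro l
  induction l with
  | nil => intro dot minus _; simp [isfloatLoopA, bodyOK]
  | cons c rest ih =>
    intro dot minus hm
    unfold isfloatLoopA
    by_cases hd : PySem.Chars.isdigit c = true
    · have hne : c ≠ '.' := by intro h; subst h; exact absurd hd (by decide)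
      have hne2 : c ≠ '-' := by intro h; subst h; exact absurd hd (by decide)
      simp [hd, bodyOK, hne, ih dot minus hm]
    · by_cases hc : c = '.'
      · subst hc
        cases dot with
        | false =>
          simp only [hd, if_false, if_pos rfl]
          simp [ih true minus hm, bodyOK]
        | true =>
          simp [hd, bodyOK, List.count_cons]
      · by_cases hmc : c = '-'
        · subst hmc
          rcases hm with hm | hm
          · subst hm
            simp [hd, bodyOK]
          · simp [hd, hm, bodyOK]
        · simp [hd, hc, hmc, Bool.false_and, bodyOK]

theorem alt_body (l : List Char) :
    ((if 1 < PySem.Chars.count l ['.'] then false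
      else l.all (fun c => PySem.Chars.isdigit c || c == '.'))) = bodyOK l 1 := by
  rw [count_dot]
  by_cases h : 1 < l.count '.'
  · simp [h, bodyOK, show ¬ l.count '.' ≤ 1 by omega]
  · simp [h, bodyOK, show l.count '.' ≤ 1 by omega]

-- ===== VERDICT (by name: the statement is the Claim_ definition above) =====
theorem isfloat_spec : Claim_equal_isfloat := by
  intro token _
  unfold Spec_isfloat isfloat isfloat_alt
  cases htl : token.toList with
  | nil => simp [isfloatLoopA, PySem.List.slice, count_dot]
  | cons c rest =>
    by_cases hc : c = '-'
    · subst hc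
      have h1 : PySem.List.slice ('-' :: rest) none (some 1) = ['-'] := by
        simp [PySem.List.slice]
      have h2 : PySem.List.slice ('-' :: rest) (some 1) none = rest := by
        simp [PySem.List.slice]
      simp only [htl, h1, if_pos rfl, h2]
      rw [alt_body]
      show isfloatLoopA ('-'::rest) ('-'::rest) false false = _
      unfold isfloatLoopA
      have : PySem.List.pyGet? ('-'::rest) 0 = some '-' := by simp [PySem.List.pyGet?, PySem.List.pyIdx?]
      simp only [show PySem.Chars.isdigit '-' = false by decide, if_false,
        show ('-' : Char) ≠ '.' from by decide, this]
      simp [loopA_eq ('-'::rest) rest false true (Or.inl rfl)]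
    · have hget : PySem.List.pyGet? (c::rest) 0 = some c := by simp [PySem.List.pyGet?, PySem.List.pyIdx?]
      have h1 : PySem.List.slice (c :: rest) none (some 1) ≠ ['-'] := by
        simp [PySem.List.slice]
        intro h
        exact absurd h hc
      simp only [htl, h1, if_neg h1]
      rw [alt_body]
      exact loopA_eq (c::rest) (c::rest) false false (Or.inr (by simp [hget, hc]))
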